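-- pv_equiv track=rewrite | github.com/nallapuneniprudhvi/cp_elective | 08-nth_additive_prime-Python/nth_additive_prime.py | fun_nth_additive_prime
-- ===== SOURCE A (Python) =====
-- def isPrime(n):
-- 	if n<2 or (n%2 == 0 and n!=2):
-- 		return False
-- 	if n == 2:
-- 		return True
-- 	else:
-- 		for i in range(3,n//2,2):
-- 			if n%i == 0:
-- 				return False
-- 		return True
--
-- def numSum(n):
-- 	rem = 0
-- 	sum = 0
-- 	while n>0:
-- 		rem = n%10
-- 		sum += rem
-- 		n = n//10
-- 	return sum
--
-- def isadditiveprime(n):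
-- 	if isPrime(n) and isPrime(numSum(n)):
-- 		return True
-- 	return False
--
-- def fun_nth_additive_prime(n):
-- 	count = 0
-- 	num = 3
-- 	if n == 0:
-- 		return 2
-- 	while n!=count:
-- 		if isadditiveprime(num):
-- 			count+=1
-- 		num+=1
-- 	return num-1
-- ===== SOURCE B (Python) =====
-- def _digit_sum(m):
--     s = 0
--     while m > 0:
--         m, r = divmod(m, 10)
--         s += r
--     return s
--
-- def _is_prime(m):
--     if m < 2:
--         return False
--     if m % 2 == 0:
--         return m == 2
--     if m % 3 == 0:
--         return m == 3
--     d = 5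
--     while d * d <= m:
--         if m % d == 0 or m % (d + 2) == 0:
--             return False
--         d += 6
--     return True
--
-- def _is_additive(m):
--     return _is_prime(m) and _is_prime(_digit_sum(m))
--
-- def fun_nth_additive_prime(n):
--     # 6k+-1 wheel with a sqrt-bounded primality test and a countdown counter
--     k = n
--     if _is_additive(2):
--         if k == 0:
--             return 2
--         k -= 1
--     if _is_additive(3):
--         if k == 0:
--             return 3
--         k -= 1
--     c = 5
--     while True:
--         if _is_additive(c):
--             if k == 0:
--                 return c
--             k -= 1
--         if _is_additive(c + 2):
--             if k == 0:
--                 return c + 2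
--             k -= 1
--         c += 6
-- ===== Notes on version B (the rewrite author's own statement) =====
-- stated objective: faster
-- what changed: Replaces A's scan of every integer with odd trial division up to half the candidate by a 6k±1 wheel enumeration with a √-bounded wheel primality test and a countdown counter.
import Mathlib
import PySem

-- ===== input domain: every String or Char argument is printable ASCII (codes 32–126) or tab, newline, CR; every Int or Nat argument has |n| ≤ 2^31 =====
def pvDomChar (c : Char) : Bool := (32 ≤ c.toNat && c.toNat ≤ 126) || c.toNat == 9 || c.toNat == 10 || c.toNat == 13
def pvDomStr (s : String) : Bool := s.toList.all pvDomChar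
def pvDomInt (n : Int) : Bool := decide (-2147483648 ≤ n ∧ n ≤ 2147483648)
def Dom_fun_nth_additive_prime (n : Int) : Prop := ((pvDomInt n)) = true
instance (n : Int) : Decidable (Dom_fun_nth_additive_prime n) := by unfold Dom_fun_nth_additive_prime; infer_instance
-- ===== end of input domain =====

-- B replaces A's scan of every integer with trial division up to n//2 by a 6k±1 wheel with a
-- √-bounded primality test and a countdown counter (measurably faster; return value equivalence only).

-- Shared totality bound for the two unbounded Python `while` loops (a fuel guard, not part of
-- either algorithm): both searches give up with -1 at this bound, far beyond any feasible input.
def pvBound : Int := 1000000000000000001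

-- ===== PORT A =====
def numSumGo (n sum : Int) : Int :=
  if _h : n > 0 then numSumGo (PySem.Int.floordiv n 10) (sum + PySem.Int.mod n 10) else sum
termination_by n.toNat
decreasing_by
  rw [PySem.Int.floordiv_eq_ediv_of_pos (by omega)]
  omega

-- `rem = n%10; sum += rem; n = n//10` folded into the accumulator of the while loop
def numSum (n : Int) : Int := numSumGo n 0

def isPrime (n : Int) : Bool :=
  if n < 2 ∨ (PySem.Int.mod n 2 = 0 ∧ n ≠ 2) then false
  else if n = 2 then true
  else (PySem.List.pyRange 3 (PySem.Int.floordiv n 2) 2).all (fun i => PySem.Int.mod n i != 0)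

def isadditiveprime (n : Int) : Bool := isPrime n && isPrime (numSum n)

def loopA (n count num : Int) : Int :=
  if n = count then num - 1
  else if _h : pvBound ≤ num then -1   -- fuel guard: Python's while is unbounded
  else loopA n (if isadditiveprime num then count + 1 else count) (num + 1)
termination_by (pvBound - num).toNat
decreasing_by omega

def fun_nth_additive_prime (n : Int) : Int :=
  if n = 0 then 2 else loopA n 0 3

-- ===== PORT B =====
def altDigitSumGo (m s : Int) : Int :=
  if _h : m > 0 then
    let qr := (PySem.Int.divmod? m 10).getD (0, 0)
    altDigitSumGo qr.1 (s + qr.2)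
  else s
termination_by m.toNat
decreasing_by
  simp only [PySem.Int.divmod?]
  split
  · omega
  · simp only [Option.getD_some]
    have : Int.fdiv m 10 = m / 10 := by rw [Int.fdiv_eq_ediv]; norm_num
    omega

def altDigitSum (m : Int) : Int := altDigitSumGo m 0

def altTrial (m d : Int) : Bool :=
  if _h : d * d ≤ m then
    if PySem.Int.mod m d = 0 ∨ PySem.Int.mod m (d + 2) = 0 then false
    else altTrial m (d + 6)
  else true
termination_by (m + 7 - d).toNat
decreasing_by
  have hdm : d ≤ m + 6 := by nlinarith [mul_self_nonneg (d - 1), mul_self_nonneg d]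
  omega

def altIsPrime (m : Int) : Bool :=
  if m < 2 then false
  else if PySem.Int.mod m 2 = 0 then m = 2
  else if PySem.Int.mod m 3 = 0 then m = 3
  else altTrial m 5

def altIsAdditive (m : Int) : Bool := altIsPrime m && altIsPrime (altDigitSum m)

def altScanGo (k c : Int) : Int :=
  if _hb : pvBound ≤ c then -1   -- fuel guard: Python's while is unbounded
  else
    if altIsAdditive c then
      if k = 0 then c
      else
        if altIsAdditive (c + 2) then
          if k - 1 = 0 then c + 2 else altScanGo (k - 2) (c + 6)
        else altScanGo (k - 1) (c + 6)
    else
      if altIsAdditive (c + 2) then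
        if k = 0 then c + 2 else altScanGo (k - 1) (c + 6)
      else altScanGo k (c + 6)
termination_by (pvBound - c).toNat
decreasing_by all_goals omega

def fun_nth_additive_prime_alt (n : Int) : Int :=
  if altIsAdditive 2 then
    if n = 0 then 2
    else
      if altIsAdditive 3 then
        if n - 1 = 0 then 3 else altScanGo (n - 2) 5
      else altScanGo (n - 1) 5
  else
    if altIsAdditive 3 then
      if n = 0 then 3 else altScanGo (n - 1) 5
    else altScanGo n 5

-- ===== PRECONDITION & SPEC =====
-- Pre_ excludes negative n, on which Python A's while loop never terminates (the counter only grows).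
def Pre_fun_nth_additive_prime (n : Int) : Prop := 0 ≤ n
instance (n : Int) : Decidable (Pre_fun_nth_additive_prime n) := by
  unfold Pre_fun_nth_additive_prime; infer_instance

def pvWitness_fun_nth_additive_prime : Int := 2

def Spec_fun_nth_additive_prime (n : Int) (out : Int) : Prop := out = fun_nth_additive_prime_alt n
instance (n : Int) (out : Int) : Decidable (Spec_fun_nth_additive_prime n out) := by
  unfold Spec_fun_nth_additive_prime; infer_instance

-- ===== CLAIM (what is proved, stated in full; the proofs are below) =====
def Claim_equal_fun_nth_additive_prime : Prop := ∀ (n : Int), Dom_fun_nth_additive_prime n → Pre_fun_nth_additive_prime n → Spec_fun_nth_additive_prime n (fun_nth_additive_prime n)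

-- ===== LEMMAS AND PROOFS =====

lemma digitSumGo_eq_fuel : ∀ (t : Nat) (n s : Int), n.toNat ≤ t → numSumGo n s = altDigitSumGo n s := by
  intro t
  induction t with
  | zero =>
    intro n s h
    rw [numSumGo, altDigitSumGo, dif_neg (by omega), dif_neg (by omega)]
  | succ t ih =>
    intro n s h
    rw [numSumGo, altDigitSumGo]
    by_cases hn : n > 0
    · rw [dif_pos hn, dif_pos hn]
      simp only [PySem.Int.divmod?, if_neg (by norm_num : ¬(10:Int) = 0), Option.getD_some]
      have hd : Int.fdiv n 10 = n / 10 := by rw [Int.fdiv_eq_ediv]; norm_num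
      have hm : n.fmod 10 = PySem.Int.mod n 10 := rfl
      have hfd : Int.fdiv n 10 = PySem.Int.floordiv n 10 := rfl
      rw [hm, hfd]
      apply ih
      rw [← hfd, hd]
      omega
    · rw [dif_neg hn, dif_neg hn]

lemma digitSumGo_eq (n : Int) : ∀ s, numSumGo n s = altDigitSumGo n s := fun s =>
  digitSumGo_eq_fuel n.toNat n s le_rfl

-- characterization of A's trial division
lemma isPrime_iff (m : Int) : isPrime m = true ↔ 2 ≤ m ∧ Nat.Prime m.toNat := by
  unfold isPrime
  by_cases h1 : m < 2 ∨ (PySem.Int.mod m 2 = 0 ∧ m ≠ 2)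
  · rw [if_pos h1]
    simp only [Bool.false_eq_true, false_iff, not_and]
    intro hm hp
    rcases h1 with h | ⟨he, hne⟩
    · omega
    · rw [PySem.Int.mod_eq_zero_iff_dvd] at he
      have h2 : 2 ∣ m.toNat := by omega
      rcases hp.eq_one_or_self_of_dvd 2 h2 with h' | h' <;> omega
  · rw [if_neg h1]
    have hm2 : ¬ m < 2 := fun h => h1 (Or.inl h)
    have hodd : PySem.Int.mod m 2 = 0 → m = 2 := by
      intro h
      by_contra hne
      exact h1 (Or.inr ⟨h, hne⟩)
    by_cases h2 : m = 2
    · subst h2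
      rw [if_pos rfl]
      simpa using Nat.prime_two
    · rw [if_neg h2]
      have hmod2 : PySem.Int.mod m 2 ≠ 0 := fun h => h2 (hodd h)
      have hodd' : ¬ (2:Int) ∣ m := by
        rw [← PySem.Int.mod_eq_zero_iff_dvd]; exact hmod2
      have hm3 : 3 ≤ m := by omega
      have hmN : ((m.toNat : Int)) = m := Int.toNat_of_nonneg (by omega)
      have hfd : PySem.Int.floordiv m 2 = m / 2 :=
        PySem.Int.floordiv_eq_ediv_of_pos (by norm_num)
      rw [List.all_eq_true]
      constructor
      · intro hall
        refine ⟨by omega, ?_⟩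
        by_contra hnp
        have hp := Nat.minFac_prime (show m.toNat ≠ 1 by omega)
        have hd := Nat.minFac_dvd m.toNat
        have hsq := Nat.minFac_sq_le_self (show 0 < m.toNat by omega) hnp
        set p := m.toNat.minFac with hpdef
        have hple : 2 ≤ p := hp.two_le
        have hp2 : p ≠ 2 := by
          intro h
          apply hodd'
          have h2N : 2 ∣ m.toNat := h ▸ hd
          omega
        have hpodd : ¬ 2 ∣ p := by
          intro hdp
          rcases hp.eq_one_or_self_of_dvd 2 hdp with h' | h' <;> omega
        have hp3 : 3 ≤ p := by omega
        have hppN : p * p ≤ m.toNat := by nlinarith [hsq]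
        have h3p : 3 * p ≤ m.toNat := by nlinarith
        have hmem : ((p : Nat) : Int) ∈ PySem.List.pyRange 3 (PySem.Int.floordiv m 2) 2 := by
          rw [PySem.List.mem_pyRange_iff_of_pos (by norm_num), hfd]
          refine ⟨by omega, by omega, by omega⟩
        have hni := hall _ hmem
        simp only [bne_iff_ne, ne_eq] at hni
        apply hni
        rw [PySem.Int.mod_eq_zero_iff_dvd, ← hmN]
        exact_mod_cast hd
      · rintro ⟨-, hp⟩ i hi
        rw [PySem.List.mem_pyRange_iff_of_pos (by norm_num)] at hi
        obtain ⟨hi3, hilt, -⟩ := hi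
        rw [hfd] at hilt
        simp only [bne_iff_ne, ne_eq]
        intro hmod0
        rw [PySem.Int.mod_eq_zero_iff_dvd] at hmod0
        have hidvd : i.toNat ∣ m.toNat := by
          rw [← Int.natCast_dvd_natCast, Int.toNat_of_nonneg (by omega : (0:Int) ≤ i), hmN]
          exact hmod0
        rcases hp.eq_one_or_self_of_dvd i.toNat hidvd with h' | h' <;> omega

-- no progression element with square below m exists once m < d*d
lemma altTrial_vac (m d : Int) (hd : 5 ≤ d) (hlt : m < d * d) :
    ∀ e : Int, d ≤ e → e % 6 = d % 6 → e * e ≤ m → ¬ e ∣ m ∧ ¬ (e + 2) ∣ m := by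
  intro e he _ hee
  exfalso
  nlinarith

-- characterization of B's wheel trial loop
lemma altTrial_iff_fuel : ∀ (t : Nat) (m d : Int), (m + 7 - d).toNat ≤ t → 5 ≤ d →
    (altTrial m d = true ↔
      ∀ e : Int, d ≤ e → e % 6 = d % 6 → e * e ≤ m → ¬ e ∣ m ∧ ¬ (e + 2) ∣ m) := by
  intro t
  induction t with
  | zero =>
    intro m d ht hd
    have hlt : m < d * d := by nlinarith [(by omega : m + 7 ≤ d)]
    rw [altTrial, dif_neg (by omega)]
    simp only [true_iff]
    exact altTrial_vac m d hd hlt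
  | succ t ih =>
    intro m d ht hd
    rw [altTrial]
    by_cases hdd : d * d ≤ m
    · rw [dif_pos hdd]
      by_cases hdiv : PySem.Int.mod m d = 0 ∨ PySem.Int.mod m (d + 2) = 0
      · rw [if_pos hdiv]
        simp only [Bool.false_eq_true, false_iff]
        intro hR
        obtain ⟨hA, hB⟩ := hR d le_rfl rfl hdd
        rcases hdiv with h | h <;> rw [PySem.Int.mod_eq_zero_iff_dvd] at h
        · exact hA h
        · exact hB h
      · rw [if_neg hdiv]
        have hnd1 : ¬ (d : Int) ∣ m := by
          rw [← PySem.Int.mod_eq_zero_iff_dvd]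
          intro h; exact hdiv (Or.inl h)
        have hnd2 : ¬ (d + 2 : Int) ∣ m := by
          rw [← PySem.Int.mod_eq_zero_iff_dvd]
          intro h; exact hdiv (Or.inr h)
        rw [ih m (d + 6) (by omega) (by omega)]
        constructor
        · intro hR e he hmod hee
          by_cases hed : e = d
          · subst hed; exact ⟨hnd1, hnd2⟩
          · exact hR e (by omega) (by omega) hee
        · intro hR e he hmod hee
          exact hR e (by omega) (by omega) hee
    · rw [dif_neg hdd]
      simp only [true_iff]
      exact altTrial_vac m d hd (by omega)

lemma altIsPrime_iff (m : Int) : altIsPrime m = true ↔ 2 ≤ m ∧ Nat.Prime m.toNat := by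
  unfold altIsPrime
  by_cases h1 : m < 2
  · rw [if_pos h1]
    simp only [Bool.false_eq_true, false_iff, not_and]
    intro hm; omega
  rw [if_neg h1]
  have hmN : ((m.toNat : Int)) = m := Int.toNat_of_nonneg (by omega)
  by_cases h2 : PySem.Int.mod m 2 = 0
  · rw [if_pos h2]
    rw [PySem.Int.mod_eq_zero_iff_dvd] at h2
    simp only [decide_eq_true_eq]
    constructor
    · rintro rfl
      exact ⟨by norm_num, by decide⟩
    · rintro ⟨hm, hp⟩
      have hd2 : 2 ∣ m.toNat := by omega
      rcases hp.eq_one_or_self_of_dvd 2 hd2 with h' | h' <;> omega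
  rw [if_neg h2]
  have hnd2 : ¬ (2:Int) ∣ m := by rw [← PySem.Int.mod_eq_zero_iff_dvd]; exact h2
  by_cases h3 : PySem.Int.mod m 3 = 0
  · rw [if_pos h3]
    rw [PySem.Int.mod_eq_zero_iff_dvd] at h3
    simp only [decide_eq_true_eq]
    constructor
    · rintro rfl
      exact ⟨by norm_num, by decide⟩
    · rintro ⟨hm, hp⟩
      have hd3 : 3 ∣ m.toNat := by omega
      rcases hp.eq_one_or_self_of_dvd 3 hd3 with h' | h' <;> omega
  rw [if_neg h3]
  have hnd3 : ¬ (3:Int) ∣ m := by rw [← PySem.Int.mod_eq_zero_iff_dvd]; exact h3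
  have hm5 : 5 ≤ m := by omega
  rw [altTrial_iff_fuel (m + 7 - 5).toNat m 5 le_rfl (by norm_num)]
  constructor
  · intro hR
    refine ⟨by omega, ?_⟩
    by_contra hnp
    have hp := Nat.minFac_prime (show m.toNat ≠ 1 by omega)
    have hd := Nat.minFac_dvd m.toNat
    have hsq := Nat.minFac_sq_le_self (show 0 < m.toNat by omega) hnp
    set p := m.toNat.minFac with hpdef
    have hple : 2 ≤ p := hp.two_le
    have hpdvdm : (p : Int) ∣ m := by
      rw [← hmN]; exact_mod_cast hd
    have hnp2 : ¬ 2 ∣ p := by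
      intro hdp
      exact hnd2 (dvd_trans (by exact_mod_cast (Int.natCast_dvd_natCast.mpr hdp)) hpdvdm)
    have hnp3 : ¬ 3 ∣ p := by
      intro hdp
      exact hnd3 (dvd_trans (by exact_mod_cast (Int.natCast_dvd_natCast.mpr hdp)) hpdvdm)
    have hp5 : 5 ≤ p := by omega
    have hppN : p * p ≤ m.toNat := by nlinarith [hsq]
    have hppm : ((p : Nat) : Int) * ((p : Nat) : Int) ≤ m := by
      rw [← hmN]; exact_mod_cast hppN
    have hp6 : p % 6 = 1 ∨ p % 6 = 5 := by omega
    rcases hp6 with h6 | h6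
    · have hp7 : 7 ≤ p := by omega
      obtain ⟨-, hB⟩ := hR ((p : Int) - 2) (by omega) (by omega) (by nlinarith)
      exact hB (by rw [show ((p : Int) - 2) + 2 = (p : Int) from by ring]; exact hpdvdm)
    · obtain ⟨hA, -⟩ := hR (p : Int) (by omega) (by omega) hppm
      exact hA hpdvdm
  · rintro ⟨hm2, hp⟩ e he hmod hee
    have he0 : (0:Int) ≤ e := by omega
    constructor
    · intro hdm
      have hedvd : e.toNat ∣ m.toNat := by
        rw [← Int.natCast_dvd_natCast, Int.toNat_of_nonneg he0, hmN]
        exact hdm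
      rcases hp.eq_one_or_self_of_dvd e.toNat hedvd with h' | h'
      · omega
      · have hem : e = m := by omega
        nlinarith
    · intro hdm
      have hedvd : (e + 2).toNat ∣ m.toNat := by
        rw [← Int.natCast_dvd_natCast, Int.toNat_of_nonneg (by omega : (0:Int) ≤ e + 2), hmN]
        exact hdm
      rcases hp.eq_one_or_self_of_dvd (e + 2).toNat hedvd with h' | h'
      · omega
      · have hem : e + 2 = m := by omega
        nlinarith


lemma isPrime_eq (m : Int) : isPrime m = altIsPrime m := by
  have h := (isPrime_iff m).trans (altIsPrime_iff m).symm
  exact Bool.eq_iff_iff.mpr h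

lemma additive_eq (m : Int) : isadditiveprime m = altIsAdditive m := by
  unfold isadditiveprime altIsAdditive numSum altDigitSum
  rw [isPrime_eq, digitSumGo_eq, isPrime_eq]

-- the integers 3, 4, 5, … below the bound / the wheel candidates 5, 7, 11, 13, … below the bound
def seqFrom (c : Int) : List Int :=
  if _h : pvBound ≤ c then [] else c :: seqFrom (c + 1)
termination_by (pvBound - c).toNat
decreasing_by omega

def cands (c : Int) : List Int :=
  if _h : pvBound ≤ c then [] else c :: (c + 2) :: cands (c + 6)
termination_by (pvBound - c).toNat
decreasing_by omega

def nthOr (xs : List Int) (k : Nat) : Int := xs.getD k (-1)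

lemma seqFrom_cons {c : Int} (h : c < pvBound) : seqFrom c = c :: seqFrom (c + 1) := by
  rw [seqFrom, dif_neg (by omega)]

lemma seqFrom_nil {c : Int} (h : pvBound ≤ c) : seqFrom c = [] := by
  rw [seqFrom, dif_pos h]

lemma cands_cons {c : Int} (h : c < pvBound) : cands c = c :: (c + 2) :: cands (c + 6) := by
  rw [cands, dif_neg (by omega)]

lemma cands_nil {c : Int} (h : pvBound ≤ c) : cands c = [] := by
  rw [cands, dif_pos h]

lemma not_additive_of_dvd (m : Int) (h5 : 5 ≤ m) (h : 2 ∣ m ∨ 3 ∣ m) :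
    isadditiveprime m = false := by
  have hfalse : isPrime m = false := by
    cases ht : isPrime m
    · rfl
    · exfalso
      obtain ⟨_, hp⟩ := (isPrime_iff m).mp ht
      rcases h with h2 | h3
      · have hd2 : 2 ∣ m.toNat := by omega
        rcases hp.eq_one_or_self_of_dvd 2 hd2 with h' | h' <;> omega
      · have hd3 : 3 ∣ m.toNat := by omega
        rcases hp.eq_one_or_self_of_dvd 3 hd3 with h' | h' <;> omega
  unfold isadditiveprime
  rw [hfalse]
  rfl

lemma pvBound_mod : pvBound % 6 = 5 := by norm_num [pvBound]

lemma seqFrom_six {c : Int} (h : c + 6 ≤ pvBound) :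
    seqFrom c = c :: (c + 1) :: (c + 2) :: (c + 3) :: (c + 4) :: (c + 5) :: seqFrom (c + 6) := by
  rw [seqFrom_cons (by omega), seqFrom_cons (by omega), seqFrom_cons (by omega),
      seqFrom_cons (by omega), seqFrom_cons (by omega), seqFrom_cons (by omega)]
  rw [show c + 1 + 1 + 1 + 1 + 1 + 1 = c + 6 from by ring,
      show c + 1 + 1 + 1 + 1 + 1 = c + 5 from by ring,
      show c + 1 + 1 + 1 + 1 = c + 4 from by ring,
      show c + 1 + 1 + 1 = c + 3 from by ring,
      show c + 1 + 1 = c + 2 from by ring]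

set_option maxHeartbeats 1000000 in
lemma filter_seq_eq_cands_fuel : ∀ (t : Nat) (c : Int), (pvBound - c).toNat ≤ t →
    c % 6 = 5 → 5 ≤ c →
    (seqFrom c).filter isadditiveprime = (cands c).filter isadditiveprime := by
  intro t
  induction t with
  | zero =>
    intro c ht hc h5
    rw [seqFrom_nil (by omega), cands_nil (by omega)]
  | succ t ih =>
    intro c ht hc h5
    by_cases hb : pvBound ≤ c
    · rw [seqFrom_nil hb, cands_nil hb]
    · have hb6 : c + 6 ≤ pvBound := by
        have hq := pvBound_mod
        omega
      rw [seqFrom_six hb6, cands_cons (by omega)]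
      have f1 : isadditiveprime (c + 1) = false :=
        not_additive_of_dvd _ (by omega) (Or.inl (by omega))
      have f3 : isadditiveprime (c + 3) = false :=
        not_additive_of_dvd _ (by omega) (Or.inl (by omega))
      have f4 : isadditiveprime (c + 4) = false :=
        not_additive_of_dvd _ (by omega) (Or.inr (by omega))
      have f5 : isadditiveprime (c + 5) = false :=
        not_additive_of_dvd _ (by omega) (Or.inl (by omega))
      simp only [List.filter_cons, f1, f3, f4, f5, Bool.false_eq_true, if_false]
      rw [ih (c + 6) (by omega) (by omega) (by omega)]

lemma loopA_char_fuel (n : Int) : ∀ (t : Nat) (c count : Int), (pvBound - c).toNat ≤ t →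
    count < n →
    loopA n count c = nthOr ((seqFrom c).filter isadditiveprime) (n - count - 1).toNat := by
  intro t
  induction t with
  | zero =>
    intro c count ht hcn
    rw [loopA, if_neg (by omega), dif_pos (by omega), seqFrom_nil (by omega)]
    simp [nthOr]
  | succ t ih =>
    intro c count ht hcn
    by_cases hb : pvBound ≤ c
    · rw [loopA, if_neg (by omega), dif_pos hb, seqFrom_nil hb]
      simp [nthOr]
    · rw [loopA, if_neg (by omega), dif_neg hb, seqFrom_cons (by omega)]
      by_cases hP : isadditiveprime c = true
      · rw [if_pos hP]
        by_cases hn1 : n = count + 1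
        · rw [loopA, if_pos (by omega)]
          have hz : (n - count - 1).toNat = 0 := by omega
          rw [hz]
          simp only [List.filter_cons, hP, if_pos, nthOr, List.getD_cons_zero]
          omega
        · rw [ih (c + 1) (count + 1) (by omega) (by omega)]
          have hsucc : (n - count - 1).toNat = (n - (count + 1) - 1).toNat + 1 := by omega
          rw [hsucc]
          simp only [List.filter_cons, hP, if_pos, nthOr, List.getD_cons_succ]
      · have hPf : isadditiveprime c = false := by simpa using hP
        rw [if_neg hP]
        rw [ih (c + 1) count (by omega) hcn]
        simp only [List.filter_cons, hPf, Bool.false_eq_true, if_false]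

lemma altScanGo_char_fuel : ∀ (t : Nat) (c k : Int), (pvBound - c).toNat ≤ t →
    c % 6 = 5 → 0 ≤ k →
    altScanGo k c = nthOr ((cands c).filter altIsAdditive) k.toNat := by
  intro t
  induction t with
  | zero =>
    intro c k ht hc hk
    rw [altScanGo, dif_pos (by omega), cands_nil (by omega)]
    simp [nthOr]
  | succ t ih =>
    intro c k ht hc hk
    by_cases hb : pvBound ≤ c
    · rw [altScanGo, dif_pos hb, cands_nil hb]
      simp [nthOr]
    · rw [altScanGo, dif_neg hb, cands_cons (by omega)]
      have hm6 : (c + 6) % 6 = 5 := by omega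
      have hmeas : (pvBound - (c + 6)).toNat ≤ t := by omega
      by_cases hP : altIsAdditive c = true
      · rw [if_pos hP]
        by_cases hk0 : k = 0
        · rw [if_pos hk0, hk0]
          simp only [List.filter_cons, hP, if_pos, nthOr, Int.toNat_zero, List.getD_cons_zero]
        · rw [if_neg hk0]
          by_cases hQ : altIsAdditive (c + 2) = true
          · rw [if_pos hQ]
            by_cases hk1 : k - 1 = 0
            · rw [if_pos hk1]
              have hk' : k.toNat = 1 := by omega
              rw [hk']
              simp only [List.filter_cons, hP, hQ, if_pos, nthOr, List.getD_cons_succ,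
                List.getD_cons_zero]
            · rw [if_neg hk1]
              rw [ih (c + 6) (k - 2) hmeas hm6 (by omega)]
              have hk' : k.toNat = (k - 2).toNat + 1 + 1 := by omega
              rw [hk']
              simp only [List.filter_cons, hP, hQ, if_pos, nthOr, List.getD_cons_succ]
          · have hQf : altIsAdditive (c + 2) = false := by simpa using hQ
            rw [if_neg hQ]
            rw [ih (c + 6) (k - 1) hmeas hm6 (by omega)]
            have hk' : k.toNat = (k - 1).toNat + 1 := by omega
            rw [hk']
            simp only [List.filter_cons, hP, hQf, Bool.false_eq_true, if_false, if_pos, nthOr,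
              List.getD_cons_succ]
      · have hPf : altIsAdditive c = false := by simpa using hP
        rw [if_neg hP]
        by_cases hQ : altIsAdditive (c + 2) = true
        · rw [if_pos hQ]
          by_cases hk0 : k = 0
          · rw [if_pos hk0, hk0]
            simp only [List.filter_cons, hPf, hQ, Bool.false_eq_true, if_false, if_pos, nthOr,
              Int.toNat_zero, List.getD_cons_zero]
          · rw [if_neg hk0]
            rw [ih (c + 6) (k - 1) hmeas hm6 (by omega)]
            have hk' : k.toNat = (k - 1).toNat + 1 := by omega
            rw [hk']
            simp only [List.filter_cons, hPf, hQ, Bool.false_eq_true, if_false, if_pos, nthOr,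
              List.getD_cons_succ]
        · have hQf : altIsAdditive (c + 2) = false := by simpa using hQ
          rw [if_neg hQ]
          rw [ih (c + 6) k hmeas hm6 hk]
          simp only [List.filter_cons, hPf, hQf, Bool.false_eq_true, if_false]

lemma numSum_small (n : Int) (h1 : 0 < n) (h2 : n < 10) : numSum n = n := by
  rw [numSum, numSumGo, dif_pos h1]
  have hf : PySem.Int.floordiv n 10 = 0 := by
    show Int.fdiv n 10 = 0
    rw [Int.fdiv_eq_ediv]
    norm_num
    omega
  have hm : (0 : Int) + PySem.Int.mod n 10 = n := by
    show (0 : Int) + Int.fmod n 10 = n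
    rw [Int.fmod_eq_emod]
    norm_num
    omega
  rw [hf, hm, numSumGo, dif_neg (by omega)]

lemma additive_2 : isadditiveprime 2 = true := by
  unfold isadditiveprime
  rw [numSum_small 2 (by norm_num) (by norm_num)]
  decide
lemma additive_3 : isadditiveprime 3 = true := by
  unfold isadditiveprime
  rw [numSum_small 3 (by norm_num) (by norm_num)]
  decide
lemma additive_4 : isadditiveprime 4 = false := by
  unfold isadditiveprime
  rw [numSum_small 4 (by norm_num) (by norm_num)]
  decide

-- ===== VERDICT (by name: the statement is the Claim_ definition above) =====
theorem fun_nth_additive_prime_spec : Claim_equal_fun_nth_additive_prime := by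
  unfold Claim_equal_fun_nth_additive_prime
  intro n _hdom hpre
  unfold Pre_fun_nth_additive_prime at hpre
  unfold Spec_fun_nth_additive_prime
  have hfun : isadditiveprime = altIsAdditive := funext additive_eq
  have hB2 : altIsAdditive 2 = true := by rw [← hfun]; exact additive_2
  have hB3 : altIsAdditive 3 = true := by rw [← hfun]; exact additive_3
  rw [fun_nth_additive_prime, fun_nth_additive_prime_alt, if_pos hB2]
  by_cases h0 : n = 0
  · rw [if_pos h0, if_pos h0]
  · rw [if_neg h0, if_neg h0, if_pos hB3]
    have h0n : 0 < n := by omega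
    have hlt3 : (3:Int) < pvBound := by norm_num [pvBound]
    have hlt4 : (4:Int) < pvBound := by norm_num [pvBound]
    rw [loopA_char_fuel n (pvBound - 3).toNat 3 0 le_rfl h0n]
    rw [seqFrom_cons hlt3, show (3:Int) + 1 = 4 from by norm_num,
        seqFrom_cons hlt4, show (4:Int) + 1 = 5 from by norm_num]
    rw [show n - 0 - 1 = n - 1 from by ring]
    simp only [List.filter_cons, additive_3, additive_4, Bool.false_eq_true, if_false, if_pos]
    rw [filter_seq_eq_cands_fuel (pvBound - 5).toNat 5 le_rfl (by norm_num) (by norm_num)]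
    by_cases h1 : n = 1
    · rw [if_pos (show n - 1 = 0 from by omega)]
      rw [show (n - 1).toNat = 0 from by omega]
      unfold nthOr
      exact List.getD_cons_zero
    · rw [if_neg (show ¬ n - 1 = 0 from by omega)]
      rw [altScanGo_char_fuel (pvBound - 5).toNat 5 (n - 2) le_rfl (by norm_num) (by omega)]
      rw [hfun]
      rw [show (n - 1).toNat = (n - 2).toNat + 1 from by omega]
      unfold nthOr
      exact List.getD_cons_succ
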